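-- pv_equiv track=rewrite | github.com/orionpoyet/Elderly-Medication-Burden-Calculator | elderly_med_burden.py | calculate_memory_actions_per_day
-- ===== SOURCE A (Python) =====
-- def calculate_memory_actions_per_day(meds):
--     """Calculate how many times per day patient must remember to take medications"""
--     timing_slots = set()
--
--     for med in meds:
--         doses = med["doses_per_day"]
--         if doses == 1:
--             timing_slots.add("morning")
--         elif doses == 2:
--             timing_slots.add("morning")
--             timing_slots.add("evening")
--         elif doses == 3:
--             timing_slots.add("morning")
--             timing_slots.add("noon")
--             timing_slots.add("evening")
--         elif doses >= 4:
--             timing_slots.add("morning")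
--             timing_slots.add("noon")
--             timing_slots.add("evening")
--             timing_slots.add("bedtime")
--
--     return len(timing_slots)
-- ===== SOURCE B (Python) =====
-- def _slot_count(doses):
--     """Number of timing slots a single medication occupies."""
--     if doses == 1:
--         return 1
--     elif doses == 2:
--         return 2
--     elif doses == 3:
--         return 3
--     elif doses >= 4:
--         return 4
--     else:
--         return 0
--
-- def calculate_memory_actions_per_day(meds):
--     """Calculate how many times per day patient must remember to take medications.
--
--     The slot sets of the original are nested (morning < morning/evening < ...),
--     so the number of distinct slots is simply the maximum per-med slot count."""
--     best = 0
--     for med in meds: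
--         k = _slot_count(med["doses_per_day"])
--         if k > best:
--             best = k
--     return best
-- ===== Notes on version B (the rewrite author's own statement) =====
-- stated objective: simpler
-- what changed: Replaces the accumulated set of slot strings by a running integer maximum of per-med slot counts, exploiting that the slot sets are nested, so no set is built at all.
import Mathlib
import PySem

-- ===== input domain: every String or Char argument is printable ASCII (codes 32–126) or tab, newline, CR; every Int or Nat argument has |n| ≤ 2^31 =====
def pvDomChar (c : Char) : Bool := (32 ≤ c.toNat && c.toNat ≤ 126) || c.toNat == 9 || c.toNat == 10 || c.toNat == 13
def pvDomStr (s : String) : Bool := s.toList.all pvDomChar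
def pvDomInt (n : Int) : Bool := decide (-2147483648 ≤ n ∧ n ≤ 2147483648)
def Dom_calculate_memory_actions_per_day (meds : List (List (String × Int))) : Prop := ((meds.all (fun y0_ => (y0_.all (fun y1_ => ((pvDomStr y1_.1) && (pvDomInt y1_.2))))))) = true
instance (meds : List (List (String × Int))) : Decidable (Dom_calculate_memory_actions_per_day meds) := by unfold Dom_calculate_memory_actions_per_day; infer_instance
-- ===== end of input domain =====

-- B replaces A's accumulated set of slot strings by a running integer maximum of
-- per-med slot counts (the slot sets are nested), which is simpler: no set is built.

-- ===== PORT A =====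
-- the if/elif ladder of A's loop body, adding slot strings to the set
def pvBranchA (s : PySem.Set String) (doses : Int) : PySem.Set String :=
  if doses = 1 then PySem.Set.add s "morning"
  else if doses = 2 then PySem.Set.add (PySem.Set.add s "morning") "evening"
  else if doses = 3 then
    PySem.Set.add (PySem.Set.add (PySem.Set.add s "morning") "noon") "evening"
  else if 4 ≤ doses then
    PySem.Set.add (PySem.Set.add (PySem.Set.add (PySem.Set.add s "morning") "noon") "evening") "bedtime"
  else s

def calculate_memory_actions_per_day (meds : List (List (String × Int))) : Int :=
  -- med["doses_per_day"] ported by hand as first-match assoc lookup (exact); .getD 0 is its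
  -- total form, exact under Pre_ (key present; A raises KeyError otherwise)
  ((meds.foldl (fun s med => pvBranchA s ((List.lookup "doses_per_day" med).getD 0))
      PySem.Set.empty).length : Int)

-- ===== PORT B =====
-- B's helper _slot_count: the same ladder, returning the slot count
def pvSlotCount (doses : Int) : Int :=
  if doses = 1 then 1
  else if doses = 2 then 2
  else if doses = 3 then 3
  else if 4 ≤ doses then 4
  else 0

def calculate_memory_actions_per_day_alt (meds : List (List (String × Int))) : Int :=
  meds.foldl (fun best med =>
    let k := pvSlotCount ((List.lookup "doses_per_day" med).getD 0)
    if best < k then k else best) 0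

-- ===== PRECONDITION & SPEC =====
-- Pre_ excludes exactly the inputs where A raises KeyError: some med lacks "doses_per_day".
def Pre_calculate_memory_actions_per_day (meds : List (List (String × Int))) : Prop :=
  (meds.all (fun med => (List.lookup "doses_per_day" med).isSome)) = true
instance (meds : List (List (String × Int))) : Decidable (Pre_calculate_memory_actions_per_day meds) := by unfold Pre_calculate_memory_actions_per_day; infer_instance

def pvWitness_calculate_memory_actions_per_day : (List (List (String × Int))) :=
  [[("doses_per_day", 2)], [("doses_per_day", 1)]]

def Spec_calculate_memory_actions_per_day (meds : List (List (String × Int))) (out : Int) : Prop := out = calculate_memory_actions_per_day_alt meds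
instance (meds : List (List (String × Int))) (out : Int) : Decidable (Spec_calculate_memory_actions_per_day meds out) := by unfold Spec_calculate_memory_actions_per_day; infer_instance

-- ===== CLAIM (what is proved, stated in full; the proofs are below) =====
def Claim_equal_calculate_memory_actions_per_day : Prop := ∀ (meds : List (List (String × Int))), Dom_calculate_memory_actions_per_day meds → Pre_calculate_memory_actions_per_day meds → Spec_calculate_memory_actions_per_day meds (calculate_memory_actions_per_day meds)

-- ===== LEMMAS AND PROOFS =====

-- the canonical slot set of a running maximum c
def pvSlots (c : Int) : List String :=
  if c = 1 then ["morning"]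
  else if c = 2 then ["morning", "evening"]
  else if c = 3 then ["morning", "noon", "evening"]
  else if c = 4 then ["morning", "noon", "evening", "bedtime"]
  else []

def pvRange (c : Int) : Prop := c = 0 ∨ c = 1 ∨ c = 2 ∨ c = 3 ∨ c = 4

lemma pv_perm_add {α : Type} [BEq α] [LawfulBEq α] {s t : List α} (h : s.Perm t) (x : α) :
    (PySem.Set.add s x).Perm (PySem.Set.add t x) := by
  rw [PySem.Set.add_eq_ite, PySem.Set.add_eq_ite]
  by_cases hx : x ∈ s
  · rw [if_pos hx, if_pos (h.mem_iff.mp hx)]; exact h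
  · rw [if_neg hx, if_neg (fun hxt => hx (h.mem_iff.mpr hxt))]; exact h.append_right [x]

lemma pvSlotCount_range (d : Int) : pvRange (pvSlotCount d) := by
  unfold pvRange pvSlotCount; split_ifs <;> norm_num

lemma pvBranchA_eq (s : PySem.Set String) (d : Int) :
    pvBranchA s d =
      (if pvSlotCount d = 1 then PySem.Set.add s "morning"
       else if pvSlotCount d = 2 then PySem.Set.add (PySem.Set.add s "morning") "evening"
       else if pvSlotCount d = 3 then
         PySem.Set.add (PySem.Set.add (PySem.Set.add s "morning") "noon") "evening"
       else if pvSlotCount d = 4 then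
         PySem.Set.add (PySem.Set.add (PySem.Set.add (PySem.Set.add s "morning") "noon") "evening") "bedtime"
       else s) := by
  unfold pvBranchA pvSlotCount; split_ifs <;> first | rfl | omega

lemma pv_step {s : List String} {c : Int} (k : Int) (hk : pvRange k) (hc : pvRange c)
    (h : s.Perm (pvSlots c)) :
    ((if k = 1 then PySem.Set.add s "morning"
      else if k = 2 then PySem.Set.add (PySem.Set.add s "morning") "evening"
      else if k = 3 then
        PySem.Set.add (PySem.Set.add (PySem.Set.add s "morning") "noon") "evening"
      else if k = 4 then
        PySem.Set.add (PySem.Set.add (PySem.Set.add (PySem.Set.add s "morning") "noon") "evening") "bedtime"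
      else s) : List String).Perm (pvSlots (if c < k then k else c)) := by
  rcases hk with rfl | rfl | rfl | rfl | rfl <;>
    rcases hc with rfl | rfl | rfl | rfl | rfl <;>
    norm_num <;>
    first
      | exact h.trans (by decide)
      | exact (pv_perm_add h _).trans (by decide)
      | exact (pv_perm_add (pv_perm_add h _) _).trans (by decide)
      | exact (pv_perm_add (pv_perm_add (pv_perm_add h _) _) _).trans (by decide)
      | exact (pv_perm_add (pv_perm_add (pv_perm_add (pv_perm_add h _) _) _) _).trans (by decide)

lemma pv_newc_range {c k : Int} (hc : pvRange c) (hk : pvRange k) :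
    pvRange (if c < k then k else c) := by
  split_ifs <;> assumption

lemma pv_fold (meds : List (List (String × Int))) :
    ∀ (s : List String) (c : Int), pvRange c → s.Perm (pvSlots c) →
    (meds.foldl (fun s med => pvBranchA s ((List.lookup "doses_per_day" med).getD 0)) s).Perm
      (pvSlots (meds.foldl (fun best med =>
        let k := pvSlotCount ((List.lookup "doses_per_day" med).getD 0)
        if best < k then k else best) c))
    ∧ pvRange (meds.foldl (fun best med =>
        let k := pvSlotCount ((List.lookup "doses_per_day" med).getD 0)
        if best < k then k else best) c) := by
  induction meds with
  | nil => intro s c hc h; exact ⟨h, hc⟩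
  | cons med rest ih =>
      intro s c hc h
      have hk := pvSlotCount_range ((List.lookup "doses_per_day" med).getD 0)
      have hstep := pv_step (s := s) (c := c) _ hk hc h
      rw [← pvBranchA_eq] at hstep
      exact ih _ _ (pv_newc_range hc hk) hstep

lemma pvSlots_length {c : Int} (hc : pvRange c) : ((pvSlots c).length : Int) = c := by
  rcases hc with rfl | rfl | rfl | rfl | rfl <;> decide

-- ===== VERDICT (by name: the statement is the Claim_ definition above) =====
theorem calculate_memory_actions_per_day_spec : Claim_equal_calculate_memory_actions_per_day := by
  intro meds _ _
  unfold Spec_calculate_memory_actions_per_day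
  unfold calculate_memory_actions_per_day calculate_memory_actions_per_day_alt
  obtain ⟨hperm, hrange⟩ :=
    pv_fold meds PySem.Set.empty 0 (Or.inl rfl) (by decide)
  rw [hperm.length_eq, pvSlots_length hrange]
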